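-- pv_equiv track=rewrite | github.com/vkmindia80/LogicCanvas | backend/execution_engine.py | _is_retryable_error
-- ===== SOURCE A (Python) =====
-- def _is_retryable_error(error_msg: str) -> bool:
--     """Determine if an error is retryable (network, timeout, 5xx)"""
--     error_lower = error_msg.lower()
--     retryable_keywords = [
--         "timeout", "connection", "network", "unavailable",
--         "503", "502", "500", "504", "429",  # HTTP status codes
--         "temporarily", "transient"
--     ]
--     return any(keyword in error_lower for keyword in retryable_keywords)
-- ===== SOURCE B (Python) =====
-- _RETRYABLE_KEYWORDS = ("timeout", "connection", "network", "unavailable",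
--                        "503", "502", "500", "504", "429",
--                        "temporarily", "transient")
--
--
-- def _match_at(s: str, i: int, kw: str) -> bool:
--     """Does keyword kw match s at position i, folding case on the fly?"""
--     if i + len(kw) > len(s):
--         return False
--     for j, k in enumerate(kw):
--         c = s[i + j]
--         if 'A' <= c <= 'Z':
--             c = chr(ord(c) + 32)
--         if c != k:
--             return False
--     return True
--
--
-- def _is_retryable_error(error_msg: str) -> bool:
--     """Single left-to-right scan over positions: at each position try each
--     keyword character by character, lowercasing characters on the fly
--     (no lowered copy of the string, no repeated whole-string substring scans)."""
--     for i in range(len(error_msg)):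
--         for kw in _RETRYABLE_KEYWORDS:
--             if _match_at(error_msg, i, kw):
--                 return True
--     return False
-- ===== Notes on version B (the rewrite author's own statement) =====
-- stated objective: alternative
-- what changed: A lowercases the whole string and runs a separate substring-containment scan per keyword; B makes one left-to-right pass over positions, matching each keyword character by character with on-the-fly case folding and no lowered copy.
import Mathlib
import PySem

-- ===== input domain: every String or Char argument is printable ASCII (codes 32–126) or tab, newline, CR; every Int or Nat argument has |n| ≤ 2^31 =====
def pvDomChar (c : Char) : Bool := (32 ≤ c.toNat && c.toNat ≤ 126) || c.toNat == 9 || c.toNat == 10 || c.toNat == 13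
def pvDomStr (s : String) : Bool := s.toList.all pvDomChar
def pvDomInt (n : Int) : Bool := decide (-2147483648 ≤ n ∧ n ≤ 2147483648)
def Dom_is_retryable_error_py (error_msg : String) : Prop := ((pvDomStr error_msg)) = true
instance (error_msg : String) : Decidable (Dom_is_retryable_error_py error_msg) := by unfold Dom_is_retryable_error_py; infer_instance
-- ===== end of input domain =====

-- B replaces A's per-keyword substring scans over a lowered copy of the string
-- with one left-to-right positional scan matching keywords char-by-char with
-- on-the-fly case folding (objective: alternative traversal, same cost class).


-- ===== PORT A =====
def is_retryable_error_py (error_msg : String) : Bool :=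
  let error_lower := PySem.Str.lower error_msg
  let retryable_keywords : List String :=
    ["timeout", "connection", "network", "unavailable",
     "503", "502", "500", "504", "429",
     "temporarily", "transient"]
  retryable_keywords.any (fun keyword => PySem.Str.isIn keyword error_lower)

-- ===== PORT B =====
def pvKeywordsB : List String :=
  ["timeout", "connection", "network", "unavailable",
   "503", "502", "500", "504", "429",
   "temporarily", "transient"]

-- on-the-fly ASCII case folding of one character (B's inline `if 'A' <= c <= 'Z'`)
def pvLcB (c : Char) : Char :=
  if 'A' ≤ c ∧ c ≤ 'Z' then Char.ofNat (c.toNat + 32) else c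

-- char-by-char match of a keyword against the text at the current position
def pvMatchAtB : List Char → List Char → Bool
  | [], _ => true
  | _ :: _, [] => false
  | k :: ks, c :: cs => (pvLcB c == k) && pvMatchAtB ks cs

-- the outer scan over positions (B's `for i in range(len(error_msg))`)
def pvScanB : List Char → Bool
  | [] => false
  | c :: cs => pvKeywordsB.any (fun kw => pvMatchAtB kw.toList (c :: cs)) || pvScanB cs

def is_retryable_error_py_alt (error_msg : String) : Bool :=
  pvScanB error_msg.toList

-- ===== PRECONDITION & SPEC =====
def Spec_is_retryable_error_py (error_msg : String) (out : Bool) : Prop := out = is_retryable_error_py_alt error_msg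
instance (error_msg : String) (out : Bool) : Decidable (Spec_is_retryable_error_py error_msg out) := by unfold Spec_is_retryable_error_py; infer_instance

-- ===== CLAIM (what is proved, stated in full; the proofs are below) =====
def Claim_equal_is_retryable_error_py : Prop := ∀ (error_msg : String), Dom_is_retryable_error_py error_msg → Spec_is_retryable_error_py error_msg (is_retryable_error_py error_msg)

-- ===== LEMMAS AND PROOFS =====
theorem pvLcB_eq_lowerChar (c : Char) : pvLcB c = PySem.Chars.lowerChar c := by
  simp [pvLcB, PySem.Chars.lowerChar, PySem.Chars.isupper]

theorem pvMatchAtB_eq_prefix (ks cs : List Char) :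
    pvMatchAtB ks cs = decide (ks <+: cs.map PySem.Chars.lowerChar) := by
  induction ks generalizing cs with
  | nil => simp [pvMatchAtB]
  | cons k ks ih =>
    cases cs with
    | nil => simp [pvMatchAtB]
    | cons c cs =>
      simp [pvMatchAtB, ih, pvLcB_eq_lowerChar, List.cons_prefix_cons,
        Bool.and_comm, Bool.beq_eq_decide_eq, eq_comm]

theorem pvAnyOr {α : Type} (l : List α) (f g : α → Bool) :
    (l.any fun x => f x || g x) = (l.any f || l.any g) := by
  induction l with
  | nil => simp
  | cons a l ih => simp [ih]; ac_rfl

theorem pvScanB_eq (cs : List Char) :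
    pvScanB cs = pvKeywordsB.any (fun kw => decide (kw.toList <:+: cs.map PySem.Chars.lowerChar)) := by
  induction cs with
  | nil => simp [pvScanB, pvKeywordsB, List.infix_nil]
  | cons c cs ih =>
    rw [pvScanB, ih]
    have h1 : pvKeywordsB.any (fun kw => decide (kw.toList <:+: (c :: cs).map PySem.Chars.lowerChar))
        = pvKeywordsB.any (fun kw =>
            decide (kw.toList <+: (c :: cs).map PySem.Chars.lowerChar)
            || decide (kw.toList <:+: cs.map PySem.Chars.lowerChar)) :=
      List.any_congr rfl (fun kw => by
        simp only [List.map_cons]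
        rw [decide_eq_decide.mpr List.infix_cons_iff]; exact Bool.decide_or _ _)
    rw [h1, pvAnyOr]
    congr 1
    exact List.any_congr rfl fun kw => by rw [pvMatchAtB_eq_prefix]

-- ===== VERDICT (by name: the statement is the Claim_ definition above) =====
theorem is_retryable_error_py_spec : Claim_equal_is_retryable_error_py := by
  intro s _
  unfold Spec_is_retryable_error_py is_retryable_error_py is_retryable_error_py_alt
  rw [pvScanB_eq]
  refine List.any_congr (by simp [pvKeywordsB]) fun kw => ?_
  rw [Bool.eq_iff_iff]
  simp [PySem.Str.toList_lower, PySem.Chars.lower, PySem.Chars.isIn_iff_infix]
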